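-- pv_equiv track=rewrite | github.com/ashaid/bracket-vis | src/data/parser.py | calculate_round_sizes
-- ===== SOURCE A (Python) =====
-- def calculate_round_sizes(bracket):
--     """
--     Calculate the number of teams in each round of a bracket.
--     """
--     num_teams = len(bracket) // 2 + 1
--     round_sizes = []
--     teams_remaining = num_teams
--
--     while teams_remaining > 1:
--         round_sizes.append(teams_remaining)
--         teams_remaining = teams_remaining // 2
--
--     round_sizes.append(1)  # Championship winner
--
--     return round_sizes
-- ===== SOURCE B (Python) =====
-- def calculate_round_sizes(bracket):
--     # Build bottom-up: each prefix of bin(n) read as a number is a round size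
--     # (doubling accumulator over the binary digits), then reverse.
--     n = len(bracket) // 2 + 1
--     acc = 0
--     out = []
--     for b in bin(n)[2:]:
--         acc = acc * 2 + int(b)
--         out.append(acc)
--     return out[::-1]
-- ===== Notes on version B (the rewrite author's own statement) =====
-- stated objective: alternative
-- what changed: Instead of A's top-down halving while-loop, B builds the sizes bottom-up: it scans the binary digits of n with a doubling accumulator (each prefix of bin(n) is a round size) and reverses the collected list.
import Mathlib
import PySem

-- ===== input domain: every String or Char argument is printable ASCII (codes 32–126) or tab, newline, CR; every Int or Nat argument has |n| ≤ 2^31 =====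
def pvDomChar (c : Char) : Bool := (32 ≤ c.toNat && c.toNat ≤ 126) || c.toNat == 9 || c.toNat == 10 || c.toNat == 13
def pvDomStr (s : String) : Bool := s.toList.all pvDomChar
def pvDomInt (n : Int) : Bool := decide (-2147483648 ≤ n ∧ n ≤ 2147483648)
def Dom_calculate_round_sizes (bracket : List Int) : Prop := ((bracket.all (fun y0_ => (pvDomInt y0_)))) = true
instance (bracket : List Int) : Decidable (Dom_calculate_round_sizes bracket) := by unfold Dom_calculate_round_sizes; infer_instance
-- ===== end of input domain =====

-- B builds the round sizes bottom-up with a doubling accumulator over the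
-- binary digits of n, then reverses — instead of A's top-down halving loop.

-- ===== PORT A =====
-- the while loop: append teams_remaining, halve, until teams_remaining ≤ 1.
-- fuel only makes the loop total (bracket.length + 1 exceeds the halving steps).
def pvLoopA : Nat → Int → List Int → List Int
  | 0, _, acc => acc ++ [1]
  | fuel + 1, t, acc =>
      if t > 1 then pvLoopA fuel (PySem.Int.floordiv t 2) (acc ++ [t]) else acc ++ [1]

def calculate_round_sizes (bracket : List Int) : List Int :=
  pvLoopA (bracket.length + 1) (PySem.Int.floordiv (bracket.length : Int) 2 + 1) []

-- ===== PORT B =====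
-- bin(n)[2:] — the binary digits of n, most significant first
def pvBits (n : Nat) : List Nat :=
  if h : n = 0 then [] else pvBits (n / 2) ++ [n % 2]
decreasing_by exact Nat.div_lt_self (Nat.pos_of_ne_zero h) (by omega)

def calculate_round_sizes_alt (bracket : List Int) : List Int :=
  let n : Nat := bracket.length / 2 + 1
  (((pvBits n).foldl
      (fun (s : Int × List Int) (b : Nat) =>
        (s.1 * 2 + (b : Int), s.2 ++ [s.1 * 2 + (b : Int)]))
      (0, [])).2).reverse

-- ===== PRECONDITION & SPEC =====
def Spec_calculate_round_sizes (bracket : List Int) (out : List Int) : Prop := out = calculate_round_sizes_alt bracket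
instance (bracket : List Int) (out : List Int) : Decidable (Spec_calculate_round_sizes bracket out) := by unfold Spec_calculate_round_sizes; infer_instance

-- ===== CLAIM =====
def Claim_equal_calculate_round_sizes : Prop := ∀ (bracket : List Int), Dom_calculate_round_sizes bracket → Spec_calculate_round_sizes bracket (calculate_round_sizes bracket)

-- ===== LEMMAS AND PROOFS =====

-- the common mathematical description: [m, m/2, ..., 1]
def pvG (m : Nat) : List Int :=
  if h : m < 2 then [1] else (m : Int) :: pvG (m / 2)
decreasing_by exact Nat.div_lt_self (by omega) (by omega)

theorem pvG_ge_two (m : Nat) (h : 2 ≤ m) : pvG m = (m : Int) :: pvG (m / 2) := by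
  rw [pvG]; simp [show ¬ m < 2 by omega]

theorem pvLoop_eq_g (m : Nat) (hm : 1 ≤ m) :
    ∀ (fuel : Nat), m ≤ fuel + 1 → ∀ acc : List Int,
      pvLoopA fuel (m : Int) acc = acc ++ pvG m := by
  induction m using Nat.strong_induction_on with
  | _ m ih =>
    intro fuel hfuel acc
    rcases Nat.lt_or_ge m 2 with h2 | h2
    · interval_cases m
      cases fuel with
      | zero => simp [pvLoopA, pvG]
      | succ f => simp [pvLoopA, pvG]
    · have hpos : (m : Int) > 1 := by exact_mod_cast h2
      cases fuel with
      | zero => omega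
      | succ f =>
        rw [pvLoopA]
        simp only [hpos, if_true]
        have hfd : PySem.Int.floordiv (m : Int) 2 = ((m / 2 : Nat) : Int) := by
          simp only [PySem.Int.floordiv]; rw [Int.fdiv_eq_ediv]; omega
        rw [hfd, ih (m / 2) (by omega) (by omega) f (by omega) (acc ++ [(m : Int)])]
        rw [pvG_ge_two m h2, List.append_assoc]
        rfl

theorem pvFold_eq_g (m : Nat) (hm : 1 ≤ m) :
    (pvBits m).foldl
      (fun (s : Int × List Int) (b : Nat) =>
        (s.1 * 2 + (b : Int), s.2 ++ [s.1 * 2 + (b : Int)]))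
      (0, []) = ((m : Int), (pvG m).reverse) := by
  induction m using Nat.strong_induction_on with
  | _ m ih =>
    rcases Nat.lt_or_ge m 2 with h2 | h2
    · interval_cases m
      simp [pvBits, pvG]
    · rw [pvBits]
      simp only [show ¬ m = 0 by omega, dite_false, List.foldl_append]
      rw [ih (m / 2) (Nat.div_lt_self (by omega) (by omega)) (by omega)]
      have hm2 : ((m / 2 : Nat) : Int) * 2 + ((m % 2 : Nat) : Int) = (m : Int) := by
        have := Nat.div_add_mod m 2; push_cast; omega
      simp only [List.foldl_cons, List.foldl_nil, hm2]
      rw [pvG_ge_two m h2]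
      simp

-- ===== VERDICT =====
theorem calculate_round_sizes_spec : Claim_equal_calculate_round_sizes := by
  intro bracket _
  unfold Spec_calculate_round_sizes calculate_round_sizes calculate_round_sizes_alt
  have hfd : PySem.Int.floordiv (bracket.length : Int) 2 + 1 = ((bracket.length / 2 + 1 : Nat) : Int) := by
    simp only [PySem.Int.floordiv]; rw [Int.fdiv_eq_ediv]; omega
  rw [hfd, pvLoop_eq_g (bracket.length / 2 + 1) (by omega) (bracket.length + 1) (by omega) []]
  simp [pvFold_eq_g (bracket.length / 2 + 1) (by omega)]
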